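-- pv_equiv track=rewrite | github.com/Alasdey/jam | utils/genetics.py | _tree_max_depth
-- ===== SOURCE A (Python) =====
-- from typing import Any, Callable, Dict, List, NamedTuple, Optional
--
-- def _tree_max_depth(tree: List[int]) -> int:
--     d = md = 0
--     for ch in tree:
--         if ch == 1:
--             d += 1
--             if d > md:
--                 md = d
--         elif ch == 0:
--             d -= 1
--     return md
-- ===== SOURCE B (Python) =====
-- def _tree_max_depth(tree):
--     deltas = [1 if ch == 1 else (-1 if ch == 0 else 0) for ch in tree]
--     depths = [0]
--     for x in deltas:
--         depths.append(depths[-1] + x)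
--     return max(depths)
-- ===== Notes on version B (the rewrite author's own statement) =====
-- stated objective: alternative
-- what changed: B builds a prefix-sum table of per-token depth deltas (with baseline 0) and returns its max reduction, instead of A's single loop tracking the running depth and running maximum inline.
import Mathlib
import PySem

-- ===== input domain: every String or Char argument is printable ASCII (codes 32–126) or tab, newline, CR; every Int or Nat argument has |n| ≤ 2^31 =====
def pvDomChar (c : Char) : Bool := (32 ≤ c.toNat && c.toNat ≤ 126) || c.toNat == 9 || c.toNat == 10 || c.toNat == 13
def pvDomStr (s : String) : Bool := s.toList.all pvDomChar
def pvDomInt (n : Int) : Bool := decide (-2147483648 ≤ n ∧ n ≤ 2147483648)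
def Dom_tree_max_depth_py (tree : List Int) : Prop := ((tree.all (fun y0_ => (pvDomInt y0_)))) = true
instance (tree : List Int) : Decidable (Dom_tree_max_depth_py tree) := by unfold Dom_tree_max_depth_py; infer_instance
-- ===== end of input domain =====

-- B builds a prefix-sum table of depth deltas (baseline 0) and takes its max, instead of A's inline running-max loop; same O(n) cost.

-- ===== PORT A =====
-- A's for-loop over (d, md), branch order preserved
def tree_max_depth_py_loop (d md : Int) : List Int → Int
  | [] => md
  | ch :: t =>
    if ch = 1 then
      tree_max_depth_py_loop (d + 1) (if d + 1 > md then d + 1 else md) t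
    else if ch = 0 then
      tree_max_depth_py_loop (d - 1) md t
    else
      tree_max_depth_py_loop d md t

def tree_max_depth_py (tree : List Int) : Int := tree_max_depth_py_loop 0 0 tree

-- ===== PORT B =====
-- the per-token delta of Source B's comprehension
def pvDelta (ch : Int) : Int := if ch = 1 then 1 else if ch = 0 then -1 else 0

def tree_max_depth_py_alt (tree : List Int) : Int :=
  match PySem.List.max?
      ((tree.map pvDelta).foldl (fun acc x => acc ++ [(acc.getLast?.getD 0) + x]) [0])
      (fun y => y) with
  | some m => m
  | none => 0  -- unreachable: the table starts with [0], so Python's max never raises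

-- ===== PRECONDITION & SPEC =====
def Spec_tree_max_depth_py (tree : List Int) (out : Int) : Prop := out = tree_max_depth_py_alt tree
instance (tree : List Int) (out : Int) : Decidable (Spec_tree_max_depth_py tree out) := by unfold Spec_tree_max_depth_py; infer_instance

-- ===== CLAIM (what is proved, stated in full; the proofs are below) =====
def Claim_equal_tree_max_depth_py : Prop := ∀ (tree : List Int), Dom_tree_max_depth_py tree → Spec_tree_max_depth_py tree (tree_max_depth_py tree)

-- ===== LEMMAS AND PROOFS =====

-- max of the depth sequence starting at d
def pvMaxScan (d : Int) : List Int → Int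
  | [] => d
  | ch :: t => max d (pvMaxScan (d + pvDelta ch) t)

theorem pvMaxScan_ge (t : List Int) : ∀ d : Int, d ≤ pvMaxScan d t := by
  induction t with
  | nil => intro d; simp [pvMaxScan]
  | cons ch t ih => intro d; simp [pvMaxScan]

theorem le_foldl_max_base (t : List Int) : ∀ b : Int, b ≤ t.foldl max b := by
  induction t with
  | nil => intro b; simp
  | cons x t ih =>
    intro b
    calc b ≤ max b x := le_max_left b x
      _ ≤ t.foldl max (max b x) := ih (max b x)
      _ = (x :: t).foldl max b := by simp

theorem le_foldl_max_mem (t : List Int) : ∀ (b x : Int), x ∈ t → x ≤ t.foldl max b := by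
  induction t with
  | nil => intro b x hx; simp at hx
  | cons y t ih =>
    intro b x hx
    rcases List.mem_cons.mp hx with h | h
    · subst h
      calc x ≤ max b x := le_max_right b x
        _ ≤ t.foldl max (max b x) := le_foldl_max_base t _
        _ = (x :: t).foldl max b := by simp
    · simpa using ih (max b y) x h

-- A's loop computes max md (pvMaxScan d t) whenever d ≤ md
theorem loopA_eq (t : List Int) : ∀ d md : Int, d ≤ md →
    tree_max_depth_py_loop d md t = max md (pvMaxScan d t) := by
  induction t with
  | nil => intro d md h; simp [tree_max_depth_py_loop, pvMaxScan]; omega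
  | cons ch t ih =>
    intro d md h
    by_cases h1 : ch = 1
    · subst h1
      rw [show tree_max_depth_py_loop d md (1 :: t)
            = tree_max_depth_py_loop (d + 1) (if d + 1 > md then d + 1 else md) t from by
          simp [tree_max_depth_py_loop]]
      rw [ih (d + 1) (if d + 1 > md then d + 1 else md) (by split <;> omega)]
      have hge := pvMaxScan_ge t (d + 1)
      simp [pvMaxScan, pvDelta]
      split <;> omega
    · by_cases h0 : ch = 0
      · subst h0
        rw [show tree_max_depth_py_loop d md (0 :: t) = tree_max_depth_py_loop (d - 1) md t
            from by simp [tree_max_depth_py_loop]]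
        rw [ih (d - 1) md (by omega)]
        simp [pvMaxScan, pvDelta]
        rw [show (d + -1 : Int) = d - 1 from by ring]
        omega
      · rw [show tree_max_depth_py_loop d md (ch :: t) = tree_max_depth_py_loop d md t
            from by simp [tree_max_depth_py_loop, h0, h1]]
        rw [ih d md h]
        have hge := pvMaxScan_ge t d
        simp [pvMaxScan, pvDelta, h0, h1]
        omega

-- B's append-loop: the table extends acc, and its running max is acc's max joined with the scan max
theorem foldB_eq (t : List Int) : ∀ (acc : List Int) (d : Int), acc.getLast? = some d →
    ∃ r, ((t.map pvDelta).foldl (fun acc x => acc ++ [(acc.getLast?.getD 0) + x]) acc) = acc ++ r ∧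
      ∀ b : Int, (acc ++ r).foldl max b = max (acc.foldl max b) (pvMaxScan d t) := by
  induction t with
  | nil =>
    intro acc d hl
    refine ⟨[], by simp, ?_⟩
    intro b
    have hd : d ≤ acc.foldl max b :=
      le_foldl_max_mem acc b d (List.mem_of_getLast? hl)
    simp [pvMaxScan]
    omega
  | cons ch t ih =>
    intro acc d hl
    have hstep : (acc ++ [(acc.getLast?.getD 0) + pvDelta ch]) = acc ++ [d + pvDelta ch] := by
      simp [hl]
    obtain ⟨r, hr, hm⟩ := ih (acc ++ [d + pvDelta ch]) (d + pvDelta ch) (by simp)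
    refine ⟨[d + pvDelta ch] ++ r, ?_, ?_⟩
    · simp only [List.map_cons, List.foldl_cons, hstep]
      rw [hr]; simp
    · intro b
      have h1 : acc ++ ([d + pvDelta ch] ++ r) = (acc ++ [d + pvDelta ch]) ++ r := by simp
      rw [h1, hm b]
      have h2 : (acc ++ [d + pvDelta ch]).foldl max b = max (acc.foldl max b) (d + pvDelta ch) := by
        simp [List.foldl_append]
      rw [h2]
      have hd : d ≤ acc.foldl max b :=
        le_foldl_max_mem acc b d (List.mem_of_getLast? hl)
      have hge := pvMaxScan_ge t (d + pvDelta ch)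
      simp [pvMaxScan]
      omega

-- ===== VERDICT (by name: the statement is the Claim_ definition above) =====
theorem tree_max_depth_py_spec : Claim_equal_tree_max_depth_py := by
  intro tree _
  unfold Spec_tree_max_depth_py tree_max_depth_py tree_max_depth_py_alt
  obtain ⟨r, hr, hm⟩ := foldB_eq tree [0] 0 (by simp)
  rw [loopA_eq tree 0 0 le_rfl, hr]
  have hm0 := hm 0
  rw [show ([0] ++ r : List Int) = 0 :: r from rfl]
  rw [PySem.List.max?_id_cons]
  simp at hm0 ⊢
  omega
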